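-- pv_equiv track=rewrite | github.com/vmantrip/Problem_solving | The hurdle Race.py | hurdleRace
-- ===== SOURCE A (Python) =====
-- def hurdleRace(k, height):
--     # Write your code here
--     min_dose=0
--     max_jump=k
--     for i in height:
--         if i-max_jump>0:
--             min_dose+=(i-max_jump)
--             max_jump=max_jump+(i-max_jump)
--         else:
--             continue
--     return min_dose
-- ===== SOURCE B (Python) =====
-- def hurdleRace(k, height):
--     if not height:
--         return 0
--     return max(0, max(height) - k)
-- ===== Notes on version B (the rewrite author's own statement) =====
-- stated objective: simpler
-- what changed: Replaced A's loop that maintains a running maximum and accumulates positive increments with a closed form: max(0, max(height) - k), with an empty-list guard.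
import Mathlib
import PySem

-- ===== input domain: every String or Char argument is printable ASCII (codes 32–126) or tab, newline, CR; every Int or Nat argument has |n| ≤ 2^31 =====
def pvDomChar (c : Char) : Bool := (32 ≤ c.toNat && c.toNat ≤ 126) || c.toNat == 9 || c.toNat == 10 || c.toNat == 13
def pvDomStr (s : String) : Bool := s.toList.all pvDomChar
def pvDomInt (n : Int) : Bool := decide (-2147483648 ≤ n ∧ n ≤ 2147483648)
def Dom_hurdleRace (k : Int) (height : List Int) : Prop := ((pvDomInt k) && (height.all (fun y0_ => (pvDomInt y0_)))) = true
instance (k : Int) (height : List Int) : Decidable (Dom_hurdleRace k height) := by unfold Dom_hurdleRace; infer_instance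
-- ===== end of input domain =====

-- B computes A's result in closed form (max 0 (max height - k)) instead of A's running-maximum loop; objective: simpler.

-- ===== PORT A =====
-- loop over height with state (min_dose, max_jump)
def hurdleRace (k : Int) (height : List Int) : Int :=
  (height.foldl
    (fun (s : Int × Int) i =>
      if i - s.2 > 0 then (s.1 + (i - s.2), s.2 + (i - s.2)) else s)
    (0, k)).1

-- ===== PORT B =====
def hurdleRace_alt (k : Int) (height : List Int) : Int :=
  match height with
  | [] => 0
  | h :: t => max 0 (t.foldl max h - k)

-- ===== PRECONDITION & SPEC =====
def Spec_hurdleRace (k : Int) (height : List Int) (out : Int) : Prop := out = hurdleRace_alt k height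
instance (k : Int) (height : List Int) (out : Int) : Decidable (Spec_hurdleRace k height out) := by unfold Spec_hurdleRace; infer_instance

-- ===== CLAIM (what is proved, stated in full; the proofs are below) =====
def Claim_equal_hurdleRace : Prop := ∀ (k : Int) (height : List Int), Dom_hurdleRace k height → Spec_hurdleRace k height (hurdleRace k height)

-- ===== LEMMAS AND PROOFS =====

-- A's loop computes exactly (d + F - m, F) where F is the running maximum.
theorem loop_char (t : List Int) (d m : Int) :
    t.foldl (fun (s : Int × Int) i =>
      if i - s.2 > 0 then (s.1 + (i - s.2), s.2 + (i - s.2)) else s) (d, m)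
      = (d + t.foldl max m - m, t.foldl max m) := by
  induction t generalizing d m with
  | nil => simp
  | cons i t ih =>
    simp only [List.foldl_cons]
    by_cases h : i - m > 0
    · rw [if_pos h]
      have e : m + (i - m) = i := by ring
      rw [e, ih]
      have hmi : max m i = i := max_eq_right (by omega)
      rw [hmi]
      simp only [Prod.mk.injEq]
      exact ⟨by ring, trivial⟩
    · rw [if_neg h, ih]
      have : max m i = m := max_eq_left (by omega)
      rw [this]

theorem foldl_max_max (t : List Int) (a b : Int) :
    t.foldl max (max a b) = max a (t.foldl max b) := by
  induction t generalizing b with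
  | nil => rfl
  | cons i t ih =>
    simp only [List.foldl_cons, max_assoc, ih]

-- ===== VERDICT (by name: the statement is the Claim_ definition above) =====
theorem hurdleRace_spec : Claim_equal_hurdleRace := by
  intro k height _
  unfold Spec_hurdleRace hurdleRace hurdleRace_alt
  cases height with
  | nil => rfl
  | cons h t =>
    rw [loop_char]
    simp only [List.foldl_cons, foldl_max_max]
    rcases le_total k (t.foldl max h) with hle | hle
    · rw [max_eq_right hle, max_eq_right (by omega)]; ring
    · rw [max_eq_left hle, max_eq_left (by omega)]; ring
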